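-- pv_equiv track=rewrite | github.com/santimc98/Multiagent_Bussineess_Inteligence | src/utils/segment_enrichment.py | _resolve_label_column
-- ===== SOURCE A (Python) =====
-- from typing import Any, Dict, Iterable, List, Optional, Tuple
--
-- _EXPLICIT_SEGMENT_LABELS = {
--     "segment_id",
--     "segment",
--     "segment_label",
--     "segment_key",
--     "cluster",
--     "cluster_id",
--     "cluster_label",
--     "typology",
--     "typology_id",
--     "group",
--     "group_id",
-- }
--
-- def _column_lookup(columns: Iterable[str]) -> Dict[str, str]:
--     lookup: Dict[str, str] = {}
--     for col in columns:
--         if not col: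
--             continue
--         key = str(col).lower()
--         if key not in lookup:
--             lookup[key] = str(col)
--     return lookup
--
-- def _resolve_label_column(
--     columns: Iterable[str],
--     segment_label_column: Optional[str],
--     segment_id_key: str,
-- ) -> Optional[str]:
--     lookup = _column_lookup(columns)
--     if segment_label_column:
--         return lookup.get(str(segment_label_column).lower())
--     if segment_id_key and str(segment_id_key).lower() in lookup:
--         return lookup.get(str(segment_id_key).lower())
--     for name in sorted(_EXPLICIT_SEGMENT_LABELS):
--         if name in lookup:
--             return lookup.get(name)
--     return None
-- ===== SOURCE B (Python) =====
-- _EXPLICIT_SEGMENT_LABELS = {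
--     "segment_id", "segment", "segment_label", "segment_key",
--     "cluster", "cluster_id", "cluster_label",
--     "typology", "typology_id", "group", "group_id",
-- }
--
--
-- def _rank(candidates, key):
--     if not candidates:
--         return 0
--     if candidates[0] == key:
--         return 0
--     return 1 + _rank(candidates[1:], key)
--
--
-- def _resolve_label_column(columns, segment_label_column, segment_id_key):
--     if segment_label_column:
--         candidates = [str(segment_label_column).lower()]
--     else:
--         candidates = ([str(segment_id_key).lower()] if segment_id_key else []) \
--             + sorted(_EXPLICIT_SEGMENT_LABELS)
--     best = None
--     best_rank = len(candidates)
--     for col in columns: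
--         if not col:
--             continue
--         r = _rank(candidates, str(col).lower())
--         if r < best_rank:
--             best, best_rank = str(col), r
--     return best
-- ===== Notes on version B (the rewrite author's own statement) =====
-- stated objective: alternative
-- what changed: B makes a single pass over the columns keeping an argmin accumulator over a priority list of candidate names (built once from the label-column/id-key/sorted-labels precedence), instead of A's precomputed lowercase dict queried once per candidate.
import Mathlib
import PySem

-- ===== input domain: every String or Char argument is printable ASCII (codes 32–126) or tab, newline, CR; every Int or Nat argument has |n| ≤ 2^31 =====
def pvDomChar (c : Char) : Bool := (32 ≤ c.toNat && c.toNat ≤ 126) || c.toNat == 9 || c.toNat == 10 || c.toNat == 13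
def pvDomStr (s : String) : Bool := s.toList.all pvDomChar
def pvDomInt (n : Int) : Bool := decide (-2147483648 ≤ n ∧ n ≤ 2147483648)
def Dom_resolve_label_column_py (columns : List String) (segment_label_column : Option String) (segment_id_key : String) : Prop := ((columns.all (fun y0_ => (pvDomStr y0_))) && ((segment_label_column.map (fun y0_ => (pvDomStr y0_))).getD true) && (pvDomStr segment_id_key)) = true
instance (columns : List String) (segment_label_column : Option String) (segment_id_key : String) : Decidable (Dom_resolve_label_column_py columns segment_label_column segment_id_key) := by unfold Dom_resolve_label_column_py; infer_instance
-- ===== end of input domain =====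

-- B replaces A's dict + three per-candidate lookups by a SINGLE PASS over the columns that keeps
-- an argmin accumulator over a priority list of candidate names; objective: alternative.

-- ===== PORT A =====

-- Python truthiness of an Optional[str]: non-None and non-empty (used by both ports' first branch)
def pvTruthy : Option String → Bool
  | some s => !(s == "")
  | none => false

-- sorted(_EXPLICIT_SEGMENT_LABELS)
def pvLabelsSorted : List String :=
  ["cluster", "cluster_id", "cluster_label", "group", "group_id", "segment",
   "segment_id", "segment_key", "segment_label", "typology", "typology_id"]

-- _column_lookup
def pvLookupStep (lookup : PySem.Dict String String) (col : String) : PySem.Dict String String :=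
  if col == "" then lookup
  else
    let key := PySem.Str.lower col
    if lookup.contains key then lookup else lookup.insert key col

def pvColumnLookup (columns : List String) : PySem.Dict String String :=
  columns.foldl pvLookupStep PySem.Dict.empty

-- the final 'for name in sorted(_EXPLICIT_SEGMENT_LABELS)' loop of A
def pvLabelLoopA (lookup : PySem.Dict String String) : List String → Option String
  | [] => none
  | n :: rest => if lookup.contains n then lookup.get? n else pvLabelLoopA lookup rest

def resolve_label_column_py (columns : List String) (segment_label_column : Option String) (segment_id_key : String) : Option String :=
  let lookup := pvColumnLookup columns
  if pvTruthy segment_label_column then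
    lookup.get? (PySem.Str.lower (segment_label_column.getD ""))
  else if segment_id_key ≠ "" ∧ lookup.contains (PySem.Str.lower segment_id_key) then
    lookup.get? (PySem.Str.lower segment_id_key)
  else
    pvLabelLoopA lookup pvLabelsSorted

-- ===== PORT B =====

-- _rank: index of key in candidates, or len(candidates) if absent (recursive helper of Source B)
def pvRank : List String → String → Int
  | [], _ => 0
  | n :: t, x => if n == x then 0 else 1 + pvRank t x

-- one step of B's single pass: skip falsy columns, keep the strictly better-ranked column
def pvStep (cands : List String) (st : Option String × Int) (c : String) : Option String × Int :=
  if c == "" then st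
  else
    let r := pvRank cands (PySem.Str.lower c)
    if r < st.2 then (some c, r) else st

def resolve_label_column_py_alt (columns : List String) (segment_label_column : Option String) (segment_id_key : String) : Option String :=
  let cands :=
    if pvTruthy segment_label_column then [PySem.Str.lower (segment_label_column.getD "")]
    else (if segment_id_key ≠ "" then [PySem.Str.lower segment_id_key] else []) ++ pvLabelsSorted
  (columns.foldl (pvStep cands) (none, (cands.length : Int))).1

-- ===== PRECONDITION & SPEC =====
def Spec_resolve_label_column_py (columns : List String) (segment_label_column : Option String) (segment_id_key : String) (out : Option String) : Prop := out = resolve_label_column_py_alt columns segment_label_column segment_id_key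
instance (columns : List String) (segment_label_column : Option String) (segment_id_key : String) (out : Option String) : Decidable (Spec_resolve_label_column_py columns segment_label_column segment_id_key out) := by unfold Spec_resolve_label_column_py; infer_instance

-- ===== CLAIM (what is proved, stated in full; the proofs are below) =====
def Claim_equal_resolve_label_column_py : Prop := ∀ (columns : List String) (segment_label_column : Option String) (segment_id_key : String), Dom_resolve_label_column_py columns segment_label_column segment_id_key → Spec_resolve_label_column_py columns segment_label_column segment_id_key (resolve_label_column_py columns segment_label_column segment_id_key)

-- ===== LEMMAS AND PROOFS =====

-- proof-side reference semantics: first column matching a target, and first candidate with a match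
def pvFirstMatch (cols : List String) (target : String) : Option String :=
  cols.find? (fun c => PySem.Str.lower c == target)

def pvScan (cols : List String) : List String → Option String
  | [] => none
  | n :: rest =>
      match pvFirstMatch cols n with
      | some hit => some hit
      | none => pvScan cols rest

-- Nat twin of pvRank
def pvRankNat : List String → String → Nat
  | [], _ => 0
  | n :: t, x => if n == x then 0 else 1 + pvRankNat t x

lemma pvRank_eq_cast (ns : List String) (x : String) : pvRank ns x = (pvRankNat ns x : Int) := by
  induction ns with
  | nil => rfl
  | cons n t ih =>
    by_cases h : n == x <;> simp [pvRank, pvRankNat, h, ih]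

lemma rank_take_lt (ns : List String) (x : String) (k : Nat) (h : pvRankNat ns x < k) :
    pvRankNat (ns.take k) x = pvRankNat ns x := by
  induction ns generalizing k with
  | nil => simp
  | cons n t ih =>
    cases k with
    | zero => omega
    | succ k =>
      by_cases hn : n == x
      · simp [pvRankNat, hn]
      · have h' : pvRankNat t x < k := by
          simp [pvRankNat, hn] at h; omega
        simp [pvRankNat, hn, ih k h']

lemma rank_take_ge (ns : List String) (x : String) (k : Nat) (hk : k ≤ ns.length)
    (h : k ≤ pvRankNat ns x) : pvRankNat (ns.take k) x = k := by
  induction ns generalizing k with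
  | nil => simp at hk; simp [hk, pvRankNat]
  | cons n t ih =>
    cases k with
    | zero => simp [pvRankNat]
    | succ k =>
      by_cases hn : n == x
      · simp [pvRankNat, hn] at h
      · have hk' : k ≤ t.length := by simpa using hk
        have h' : k ≤ pvRankNat t x := by
          simp [pvRankNat, hn] at h; omega
        simp [pvRankNat, hn, ih k hk' h']
        omega

lemma scan_nil (ns : List String) : pvScan [] ns = none := by
  induction ns with
  | nil => rfl
  | cons n t ih => simp [pvScan, pvFirstMatch, ih]

lemma firstMatch_cons (c : String) (rest : List String) (n : String) :
    pvFirstMatch (c :: rest) n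
      = if PySem.Str.lower c == n then some c else pvFirstMatch rest n := by
  simp only [pvFirstMatch, List.find?_cons]
  rcases h : (PySem.Str.lower c == n) with _ | _ <;> simp

lemma scan_cons (c : String) (rest ns : List String) :
    pvScan (c :: rest) ns
      = (pvScan rest (ns.take (pvRankNat ns (PySem.Str.lower c)))).or
          (if pvRankNat ns (PySem.Str.lower c) < ns.length then some c else none) := by
  induction ns with
  | nil => simp [pvScan, pvRankNat]
  | cons n t ih =>
    by_cases h : n = PySem.Str.lower c
    · subst h
      simp [pvScan, firstMatch_cons, pvRankNat]
    · have hx : (PySem.Str.lower c == n) = false := by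
        simp; exact fun e => h e.symm
      have hn : (n == PySem.Str.lower c) = false := by simp [h]
      have hrk : pvRankNat (n :: t) (PySem.Str.lower c)
          = pvRankNat t (PySem.Str.lower c) + 1 := by
        simp [pvRankNat, hn, Nat.add_comm]
      rw [hrk, List.take_succ_cons]
      rcases hf : pvFirstMatch rest n with _ | hit
      · simp only [pvScan, firstMatch_cons, hx, Bool.false_eq_true, if_false, hf]
        rw [ih]
        simp
      · simp [pvScan, firstMatch_cons, hx, hf]

-- B's single pass equals the candidate-order scan over the truthy columns
lemma fold_main (cands : List String) (cols : List String) :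
    ∀ (b : Option String) (k : Nat), k ≤ cands.length →
    (cols.foldl (pvStep cands) (b, (k : Int))).1
      = (pvScan (cols.filter (fun c => !(c == ""))) (cands.take k)).or b := by
  induction cols with
  | nil => intro b k _; simp [scan_nil]
  | cons c rest ih =>
    intro b k hk
    rw [List.foldl_cons]
    by_cases hc : c = ""
    · have : pvStep cands (b, (k : Int)) c = (b, (k : Int)) := by simp [pvStep, hc]
      rw [this, ih b k hk]
      simp [hc]
    · have hc' : (c == "") = false := by simp [hc]
      have hfil : (c :: rest).filter (fun c => !(c == ""))
          = c :: rest.filter (fun c => !(c == "")) := by simp [hc']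
      set r := pvRankNat cands (PySem.Str.lower c) with hr
      have hrank : pvRank cands (PySem.Str.lower c) = (r : Int) := pvRank_eq_cast _ _
      by_cases hlt : r < k
      · have hstep : pvStep cands (b, (k : Int)) c = (some c, (r : Int)) := by
          simp only [pvStep, hc', Bool.false_eq_true, if_false, hrank]
          rw [if_pos (by exact_mod_cast hlt)]
        rw [hstep, ih (some c) r (le_trans (le_of_lt hlt) hk), hfil]
        rw [scan_cons]
        have h1 : pvRankNat (cands.take k) (PySem.Str.lower c) = r :=
          rank_take_lt _ _ _ hlt
        have h2 : (cands.take k).length = k := by simp [Nat.min_eq_left hk]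
        rw [h1, h2, if_pos hlt, List.take_take, Nat.min_eq_left (le_of_lt hlt)]
        rcases pvScan (rest.filter (fun c => !(c == ""))) (cands.take r) with _ | v <;> simp
      · have hstep : pvStep cands (b, (k : Int)) c = (b, (k : Int)) := by
          simp only [pvStep, hc', Bool.false_eq_true, if_false, hrank]
          rw [if_neg (by exact_mod_cast hlt)]
        rw [hstep, ih b k hk, hfil, scan_cons]
        have h1 : pvRankNat (cands.take k) (PySem.Str.lower c) = k :=
          rank_take_ge _ _ _ hk (by omega)
        have h2 : (cands.take k).length = k := by simp [Nat.min_eq_left hk]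
        rw [h1, h2, if_neg (lt_irrefl k), List.take_take, Nat.min_self]
        rcases pvScan (rest.filter (fun c => !(c == ""))) (cands.take k) with _ | v <;> simp

-- A's dict lookup at any key equals the first-match scan (generalized over the starting dict).
lemma lookup_get_eq (cols : List String) (d : PySem.Dict String String) (k : String) :
    (cols.foldl pvLookupStep d).get? k
    = (d.get? k).or (pvFirstMatch (cols.filter (fun c => !(c == ""))) k) := by
  induction cols generalizing d with
  | nil => simp [pvFirstMatch]
  | cons c rest ih =>
    rw [List.foldl_cons]
    by_cases hc : c = ""
    · have hstep : pvLookupStep d c = d := by simp [pvLookupStep, hc]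
      rw [hstep, ih]
      simp [hc]
    · have hc' : (c == "") = false := by simp [hc]
      have hfil : (c :: rest).filter (fun c => !(c == ""))
          = c :: rest.filter (fun c => !(c == "")) := by
        simp [hc']
      by_cases hmem : d.contains (PySem.Str.lower c) = true
      · have hstep : pvLookupStep d c = d := by
          simp [pvLookupStep, hc', hmem]
        rw [hstep, ih, hfil]
        by_cases hk : PySem.Str.lower c = k
        · have hs : (d.get? k).isSome := by
            rw [← PySem.Dict.contains_eq_isSome_get?, ← hk]; exact hmem
          obtain ⟨v, hv⟩ := Option.isSome_iff_exists.mp hs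
          simp [pvFirstMatch, hk, hv]
        · simp [pvFirstMatch, hk]
      · have hmem' : d.contains (PySem.Str.lower c) = false := by
          simpa using hmem
        have hn : d.get? (PySem.Str.lower c) = none := by
          rcases h : d.get? (PySem.Str.lower c) with _ | v
          · rfl
          · rw [PySem.Dict.contains_eq_isSome_get?, h] at hmem'; simp at hmem'
        have hstep : pvLookupStep d c = d.insert (PySem.Str.lower c) c := by
          simp [pvLookupStep, hc', hmem']
        rw [hstep, ih, hfil]
        by_cases hk : PySem.Str.lower c = k
        · rw [← hk, hn, PySem.Dict.get?_insert_self]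
          simp [pvFirstMatch, hk]
        · rw [PySem.Dict.get?_insert_of_ne _ _ (fun h => hk h.symm)]
          simp [pvFirstMatch, hk]

lemma lookup_get_eq' (cols : List String) (k : String) :
    (pvColumnLookup cols).get? k = pvFirstMatch (cols.filter (fun c => !(c == ""))) k := by
  rw [pvColumnLookup, lookup_get_eq]
  simp

lemma label_loop_eq (cols : List String) (names : List String) :
    pvLabelLoopA (pvColumnLookup cols) names
      = pvScan (cols.filter (fun c => !(c == ""))) names := by
  induction names with
  | nil => rfl
  | cons n rest ih =>
    rw [pvLabelLoopA, pvScan, ← lookup_get_eq' cols n, ← ih,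
        PySem.Dict.contains_eq_isSome_get?]
    rcases h : (pvColumnLookup cols).get? n with _ | v <;> simp

-- B equals the candidate-order scan
lemma alt_eq_scan (columns : List String) (slc : Option String) (sik : String) :
    resolve_label_column_py_alt columns slc sik
      = pvScan (columns.filter (fun c => !(c == "")))
          (if pvTruthy slc then [PySem.Str.lower (slc.getD "")]
           else (if sik ≠ "" then [PySem.Str.lower sik] else []) ++ pvLabelsSorted) := by
  rw [resolve_label_column_py_alt]
  set cands := (if pvTruthy slc then [PySem.Str.lower (slc.getD "")]
      else (if sik ≠ "" then [PySem.Str.lower sik] else []) ++ pvLabelsSorted) with hc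
  rw [fold_main cands columns none cands.length (le_refl _), List.take_length]
  rcases pvScan (columns.filter (fun c => !(c == ""))) cands with _ | v <;> simp

-- ===== VERDICT (by name: the statement is the Claim_ definition above) =====
theorem resolve_label_column_py_spec : Claim_equal_resolve_label_column_py := by
  intro columns slc sik _
  unfold Spec_resolve_label_column_py
  rw [alt_eq_scan]
  unfold resolve_label_column_py
  by_cases h1 : pvTruthy slc = true
  · rw [if_pos h1, if_pos h1, lookup_get_eq']
    rcases h : pvFirstMatch (columns.filter (fun c => !(c == "")))
        (PySem.Str.lower (slc.getD "")) with _ | v <;>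
      simp [pvScan, h]
  · rw [if_neg h1, if_neg h1]
    by_cases h2 : sik ≠ ""
    · rw [if_pos h2, List.singleton_append]
      by_cases h3 : (pvColumnLookup columns).contains (PySem.Str.lower sik) = true
      · rw [if_pos ⟨h2, h3⟩, lookup_get_eq']
        rw [PySem.Dict.contains_eq_isSome_get?, lookup_get_eq'] at h3
        obtain ⟨v, hv⟩ := Option.isSome_iff_exists.mp h3
        rw [hv]
        simp [pvScan, hv]
      · rw [if_neg (fun h => h3 h.2)]
        rw [PySem.Dict.contains_eq_isSome_get?, lookup_get_eq'] at h3
        rcases h : pvFirstMatch (columns.filter (fun c => !(c == "")))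
            (PySem.Str.lower sik) with _ | v
        · rw [pvScan, h, label_loop_eq]
        · rw [h] at h3; simp at h3
    · rw [if_neg (fun h => h2 h.1), if_neg h2, List.nil_append, label_loop_eq]
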